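-- pv_equiv track=rewrite | github.com/weizeming0821/VQAP | action_traj_generator.py | summarize_collection
-- ===== SOURCE A (Python) =====
-- def summarize_collection(task_files, args, progress, variation_stats):
--     planned_tasks = len(task_files)
--     stat_values = list(variation_stats.values())
--
--     total_variations = len(stat_values)
--     success_variations = [s for s in stat_values if s.get('status') == 'completed']
--     failed_variations = [s for s in stat_values if s.get('status') != 'completed']
--
--     planned_demos = sum(int(s.get('planned_demos', 0)) for s in stat_values)
--     success_demos = sum(int(s.get('success_demos', 0)) for s in stat_values)
--     failed_demos = max(0, planned_demos - success_demos)
--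
--     success_tasks = sorted({s.get('task_name') for s in success_variations if s.get('task_name')})
--     failed_tasks = sorted({s.get('task_name') for s in failed_variations if s.get('task_name')})
--
--     lines = [
--         '===== Collection Summary =====',
--         f'Planned tasks: {planned_tasks}',
--         f'Success tasks: {len(success_tasks)}',
--         f'Failed tasks: {len(failed_tasks)}',
--         f'Success variations: {len(success_variations)} / {total_variations}',
--         f'Failed variations: {len(failed_variations)} / {total_variations}',
--         f'Success demos: {success_demos} / {planned_demos}',
--         f'Failed demos: {failed_demos} / {planned_demos}',
--     ]
--
--     detail_lines = []
--     if failed_variations: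
--         task_failed_demo = {}
--         task_failed_var = {}
--         for s in failed_variations:
--             tn = s.get('task_name')
--             if not tn:
--                 continue
--             task_failed_var[tn] = task_failed_var.get(tn, 0) + 1
--             task_failed_demo[tn] = task_failed_demo.get(tn, 0) + int(s.get('failed_demos', 0))
--
--         detail_lines.append('Failed task breakdown:')
--         for tn in sorted(task_failed_var.keys()):
--             detail_lines.append(
--                 f'  - task={tn} failed_variations={task_failed_var[tn]} failed_demos={task_failed_demo[tn]}')
--
--     return lines, detail_lines
-- ===== SOURCE B (Python) =====
-- def summarize_collection(task_files, args, progress, variation_stats):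
--     # single pass over the variation stats instead of A's repeated comprehensions/sums/set-builds
--     total = len(variation_stats)
--     succ = 0
--     succ_names = set()
--     fail_names = set()
--     planned = 0
--     success = 0
--     fail_var = {}
--     fail_demo = {}
--     for s in variation_stats.values():
--         tn = s.get('task_name')
--         if s.get('status') == 'completed':
--             succ += 1
--             if tn:
--                 succ_names.add(tn)
--         elif tn:
--             fail_names.add(tn)
--             fail_var[tn] = fail_var.get(tn, 0) + 1
--             fail_demo[tn] = fail_demo.get(tn, 0) + int(s.get('failed_demos', 0))
--         planned += int(s.get('planned_demos', 0))
--         success += int(s.get('success_demos', 0))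
--     failed = total - succ
--     failed_demos = planned - success if planned > success else 0
--     lines = [
--         '===== Collection Summary =====',
--         f'Planned tasks: {len(task_files)}',
--         f'Success tasks: {len(succ_names)}',
--         f'Failed tasks: {len(fail_names)}',
--         f'Success variations: {succ} / {total}',
--         f'Failed variations: {failed} / {total}',
--         f'Success demos: {success} / {planned}',
--         f'Failed demos: {failed_demos} / {planned}',
--     ]
--     detail_lines = []
--     if failed:
--         detail_lines.append('Failed task breakdown:')
--         for tn in sorted(fail_var):
--             detail_lines.append(
--                 f'  - task={tn} failed_variations={fail_var[tn]} failed_demos={fail_demo[tn]}')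
--     return lines, detail_lines
-- ===== Notes on version B (the rewrite author's own statement) =====
-- stated objective: alternative
-- what changed: A's six separate passes over the stats (two status comprehensions, two generator sums, two set comprehensions, plus a separate breakdown loop over the failures) are replaced by one fold that maintains the success count, both task-name sets, both demo sums and the two per-task failure dicts in a single traversal.
import Mathlib
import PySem

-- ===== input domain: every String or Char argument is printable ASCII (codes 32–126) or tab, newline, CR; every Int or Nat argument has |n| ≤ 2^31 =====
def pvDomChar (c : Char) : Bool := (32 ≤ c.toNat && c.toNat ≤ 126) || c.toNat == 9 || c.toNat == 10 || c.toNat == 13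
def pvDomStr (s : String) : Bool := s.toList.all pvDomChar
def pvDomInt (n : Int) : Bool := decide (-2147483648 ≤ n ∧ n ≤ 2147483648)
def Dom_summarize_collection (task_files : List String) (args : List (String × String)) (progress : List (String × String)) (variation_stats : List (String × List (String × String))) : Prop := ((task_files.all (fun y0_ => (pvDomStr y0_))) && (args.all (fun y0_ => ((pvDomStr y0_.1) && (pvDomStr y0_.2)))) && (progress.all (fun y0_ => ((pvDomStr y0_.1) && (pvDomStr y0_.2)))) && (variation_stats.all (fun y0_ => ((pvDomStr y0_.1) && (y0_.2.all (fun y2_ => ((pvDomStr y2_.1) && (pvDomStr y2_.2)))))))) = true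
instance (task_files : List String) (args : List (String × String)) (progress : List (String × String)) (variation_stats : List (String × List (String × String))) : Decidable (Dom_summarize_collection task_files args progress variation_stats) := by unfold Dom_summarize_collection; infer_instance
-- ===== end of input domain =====

-- B replaces A's six separate passes (two comprehensions, two sums, two set builds, a breakdown loop)
-- with one fold over the stats maintaining all counters/sets/dicts at once (objective: alternative).

-- ===== PORT A =====
-- helpers shared by both ports: s.get(k), int(s.get(k, 0)), the completed test, the truthy task name
def pvGet (s : List (String × String)) (k : String) : Option String :=
  (PySem.Dict.mk s).get? k

-- int(s.get(k, 0)); on parse failure Python raises ValueError — excluded by Pre_, here 0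
def pvInt (s : List (String × String)) (k : String) : Int :=
  match pvGet s k with
  | some v => (PySem.Int.ofStr? v).getD 0
  | none => 0

def pvCompleted (s : List (String × String)) : Bool :=
  pvGet s "status" == some "completed"

-- s.get('task_name') when truthy (non-empty), else none
def pvTn (s : List (String × String)) : Option String :=
  match pvGet s "task_name" with
  | some v => if v == "" then none else some v
  | none => none

def summarize_collection (task_files : List String) (args : List (String × String)) (progress : List (String × String)) (variation_stats : List (String × List (String × String))) : List String × List String :=
  let planned_tasks : Int := task_files.length
  let stat_values := (PySem.Dict.mk variation_stats).values
  let total_variations : Int := stat_values.length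
  let success_variations := stat_values.filter (fun s => pvCompleted s)
  let failed_variations := stat_values.filter (fun s => !pvCompleted s)
  let planned_demos := (stat_values.map (fun s => pvInt s "planned_demos")).sum
  let success_demos := (stat_values.map (fun s => pvInt s "success_demos")).sum
  let failed_demos := max 0 (planned_demos - success_demos)
  let success_tasks := PySem.List.sorted (PySem.Set.ofList (success_variations.filterMap pvTn)) (fun x => x) false
  let failed_tasks := PySem.List.sorted (PySem.Set.ofList (failed_variations.filterMap pvTn)) (fun x => x) false
  let lines := [
    "===== Collection Summary =====",
    "Planned tasks: " ++ PySem.Int.toStr planned_tasks,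
    "Success tasks: " ++ PySem.Int.toStr (success_tasks.length : Int),
    "Failed tasks: " ++ PySem.Int.toStr (failed_tasks.length : Int),
    "Success variations: " ++ PySem.Int.toStr (success_variations.length : Int) ++ " / " ++ PySem.Int.toStr total_variations,
    "Failed variations: " ++ PySem.Int.toStr (failed_variations.length : Int) ++ " / " ++ PySem.Int.toStr total_variations,
    "Success demos: " ++ PySem.Int.toStr success_demos ++ " / " ++ PySem.Int.toStr planned_demos,
    "Failed demos: " ++ PySem.Int.toStr failed_demos ++ " / " ++ PySem.Int.toStr planned_demos]
  let detail_lines :=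
    if failed_variations.isEmpty then ([] : List String) else
      let dicts := failed_variations.foldl
        (fun (p : PySem.Dict String Int × PySem.Dict String Int) s =>
          match pvTn s with
          | none => p
          | some tn => (p.1.insert tn (p.1.getD tn 0 + 1),
                        p.2.insert tn (p.2.getD tn 0 + pvInt s "failed_demos")))
        (PySem.Dict.mk [], PySem.Dict.mk [])
      "Failed task breakdown:" ::
        (PySem.List.sorted dicts.1.keys (fun x => x) false).map (fun tn =>
          "  - task=" ++ tn ++ " failed_variations=" ++ PySem.Int.toStr (dicts.1.getD tn 0) ++
          " failed_demos=" ++ PySem.Int.toStr (dicts.2.getD tn 0))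
  (lines, detail_lines)

-- ===== PORT B =====
structure PvBSt where
  succ : Int
  succNames : PySem.Set String
  failNames : PySem.Set String
  planned : Int
  success : Int
  failVar : PySem.Dict String Int
  failDemo : PySem.Dict String Int

-- the single loop body of B
def pvBStep (st : PvBSt) (s : List (String × String)) : PvBSt :=
  let tn := pvTn s
  let st1 :=
    if pvCompleted s then
      { st with succ := st.succ + 1,
                succNames := match tn with
                             | some n => PySem.Set.add st.succNames n
                             | none => st.succNames }
    else
      match tn with
      | some n =>
        { st with failNames := PySem.Set.add st.failNames n,
                  failVar := st.failVar.insert n (st.failVar.getD n 0 + 1),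
                  failDemo := st.failDemo.insert n (st.failDemo.getD n 0 + pvInt s "failed_demos") }
      | none => st
  { st1 with planned := st1.planned + pvInt s "planned_demos",
             success := st1.success + pvInt s "success_demos" }

def summarize_collection_alt (task_files : List String) (args : List (String × String)) (progress : List (String × String)) (variation_stats : List (String × List (String × String))) : List String × List String :=
  let values := variation_stats.map (fun p => p.2)
  let total : Int := values.length
  let st := values.foldl pvBStep ⟨0, [], [], 0, 0, PySem.Dict.mk [], PySem.Dict.mk []⟩
  let failed := total - st.succ
  let failed_demos := if st.planned > st.success then st.planned - st.success else 0
  let lines := [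
    "===== Collection Summary =====",
    "Planned tasks: " ++ PySem.Int.toStr (task_files.length : Int),
    "Success tasks: " ++ PySem.Int.toStr (st.succNames.length : Int),
    "Failed tasks: " ++ PySem.Int.toStr (st.failNames.length : Int),
    "Success variations: " ++ PySem.Int.toStr st.succ ++ " / " ++ PySem.Int.toStr total,
    "Failed variations: " ++ PySem.Int.toStr failed ++ " / " ++ PySem.Int.toStr total,
    "Success demos: " ++ PySem.Int.toStr st.success ++ " / " ++ PySem.Int.toStr st.planned,
    "Failed demos: " ++ PySem.Int.toStr failed_demos ++ " / " ++ PySem.Int.toStr st.planned]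
  let detail_lines :=
    if failed = 0 then ([] : List String) else
      "Failed task breakdown:" ::
        (PySem.List.sorted st.failVar.keys (fun x => x) false).map (fun tn =>
          "  - task=" ++ tn ++ " failed_variations=" ++ PySem.Int.toStr (st.failVar.getD tn 0) ++
          " failed_demos=" ++ PySem.Int.toStr (st.failDemo.getD tn 0))
  (lines, detail_lines)

-- ===== PRECONDITION & SPEC =====
def pvParses (v : Option String) : Bool :=
  match v with
  | some s => (PySem.Int.ofStr? s).isSome
  | none => true

-- Pre_ excludes exactly the inputs on which Python A raises ValueError: some int(…) call
-- sees a string that does not parse as an integer.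
def Pre_summarize_collection (task_files : List String) (args : List (String × String)) (progress : List (String × String)) (variation_stats : List (String × List (String × String))) : Prop :=
  ∀ p ∈ variation_stats,
    (pvParses (pvGet p.2 "planned_demos") &&
     pvParses (pvGet p.2 "success_demos") &&
     (!(!pvCompleted p.2 && (pvTn p.2).isSome) || pvParses (pvGet p.2 "failed_demos"))) = true
instance (task_files : List String) (args : List (String × String)) (progress : List (String × String)) (variation_stats : List (String × List (String × String))) : Decidable (Pre_summarize_collection task_files args progress variation_stats) := by unfold Pre_summarize_collection; infer_instance

def pvWitness_summarize_collection : List String × (List (String × String)) × (List (String × String)) × (List (String × List (String × String))) :=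
  (["t1.json"], [("a", "1")], [("t1", "done")],
   [("t1_v0", [("status", "completed"), ("task_name", "t1"), ("planned_demos", "2"), ("success_demos", "2")]),
    ("t1_v1", [("status", "failed"), ("task_name", "t1"), ("planned_demos", "2"), ("success_demos", "1"), ("failed_demos", "1")])])

def Spec_summarize_collection (task_files : List String) (args : List (String × String)) (progress : List (String × String)) (variation_stats : List (String × List (String × String))) (out : List String × List String) : Prop := out = summarize_collection_alt task_files args progress variation_stats
instance (task_files : List String) (args : List (String × String)) (progress : List (String × String)) (variation_stats : List (String × List (String × String))) (out : List String × List String) : Decidable (Spec_summarize_collection task_files args progress variation_stats out) := by unfold Spec_summarize_collection; infer_instance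

-- ===== CLAIM (what is proved, stated in full; the proofs are below) =====
def Claim_equal_summarize_collection : Prop := ∀ (task_files : List String) (args : List (String × String)) (progress : List (String × String)) (variation_stats : List (String × List (String × String))), Dom_summarize_collection task_files args progress variation_stats → Pre_summarize_collection task_files args progress variation_stats → Spec_summarize_collection task_files args progress variation_stats (summarize_collection task_files args progress variation_stats)

-- ===== LEMMAS AND PROOFS =====

-- the two per-task dict loops of A, one dict each
def pvFailVarStep (d : PySem.Dict String Int) (s : List (String × String)) : PySem.Dict String Int :=
  match pvTn s with
  | some n => d.insert n (d.getD n 0 + 1)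
  | none => d

def pvFailDemoStep (d : PySem.Dict String Int) (s : List (String × String)) : PySem.Dict String Int :=
  match pvTn s with
  | some n => d.insert n (d.getD n 0 + pvInt s "failed_demos")
  | none => d

theorem pvPairFold (l : List (List (String × String))) (d1 d2 : PySem.Dict String Int) :
    l.foldl
      (fun (p : PySem.Dict String Int × PySem.Dict String Int) s =>
        match pvTn s with
        | none => p
        | some tn => (p.1.insert tn (p.1.getD tn 0 + 1),
                      p.2.insert tn (p.2.getD tn 0 + pvInt s "failed_demos"))) (d1, d2)
    = (l.foldl pvFailVarStep d1, l.foldl pvFailDemoStep d2) := by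
  have h : (fun (p : PySem.Dict String Int × PySem.Dict String Int) s =>
        match pvTn s with
        | none => p
        | some tn => (p.1.insert tn (p.1.getD tn 0 + 1),
                      p.2.insert tn (p.2.getD tn 0 + pvInt s "failed_demos")))
      = fun p s => (pvFailVarStep p.1 s, pvFailDemoStep p.2 s) := by
    funext p s
    cases h : pvTn s <;> simp [pvFailVarStep, pvFailDemoStep, h]
  rw [h, PySem.List.foldl_prod_mk]

-- closed form of B's single pass
theorem pvFold (l : List (List (String × String))) (st : PvBSt) :
    l.foldl pvBStep st =
      { succ := st.succ + ((l.countP pvCompleted : Nat) : Int),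
        succNames := PySem.Set.update st.succNames ((l.filter pvCompleted).filterMap pvTn),
        failNames := PySem.Set.update st.failNames ((l.filter (fun s => !pvCompleted s)).filterMap pvTn),
        planned := st.planned + (l.map (fun s => pvInt s "planned_demos")).sum,
        success := st.success + (l.map (fun s => pvInt s "success_demos")).sum,
        failVar := (l.filter (fun s => !pvCompleted s)).foldl pvFailVarStep st.failVar,
        failDemo := (l.filter (fun s => !pvCompleted s)).foldl pvFailDemoStep st.failDemo } := by
  induction l generalizing st with
  | nil => simp
  | cons s t ih =>
    simp only [List.foldl_cons, ih, pvBStep]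
    by_cases hc : pvCompleted s <;>
      cases htn : pvTn s <;>
        simp [hc, htn, PvBSt.mk.injEq, PySem.Set.update, pvFailVarStep, pvFailDemoStep] <;>
          constructor <;> omega

-- ===== VERDICT (by name: the statement is the Claim_ definition above) =====
theorem summarize_collection_spec : Claim_equal_summarize_collection := by
  intro task_files args progress variation_stats _hdom _hpre
  unfold Spec_summarize_collection
  simp only [summarize_collection, summarize_collection_alt, PySem.Dict.values, pvFold, pvPairFold,
             PySem.List.length_sorted, PySem.Set.update_nil_left, List.countP_eq_length_filter,
             zero_add]
  simp only [show (fun s => pvCompleted s) = pvCompleted from rfl]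
  have hfl : ((variation_stats.map (fun x => x.2)).length : Int)
        - ((List.filter pvCompleted (variation_stats.map (fun x => x.2))).length : Int)
      = ((List.filter (fun s => !pvCompleted s) (variation_stats.map (fun x => x.2))).length : Int) := by
    have h2 := List.length_eq_countP_add_countP (p := pvCompleted) (l := variation_stats.map (fun x => x.2))
    simp [List.countP_eq_length_filter] at h2 ⊢
    omega
  rw [hfl]
  have hmax : ∀ p s : Int, max 0 (p - s) = if s < p then p - s else 0 := by
    intro p s; split <;> omega
  rw [hmax]
  by_cases he : List.filter (fun s => !pvCompleted s) (variation_stats.map (fun x => x.2)) = []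
  · simp [he]
  · simp [he, List.isEmpty_iff]
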